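-- pv_equiv track=rewrite | github.com/Breigner01/HUB_challenge | fibonacci.py | perimetre
-- ===== SOURCE A (Python) =====
-- def perimetre(nb):
--     square_1 = 0
--     square_2 = 1
--     square_3 = 1
--     perimeter = 4
--
--     for i in range(nb):
--         perimeter += 4 * square_3
--         square_1 = square_2
--         square_2 = square_3
--         square_3 += square_1
--     return perimeter
-- ===== SOURCE B (Python) =====
-- def _fib_pair(n):
--     # fast doubling: returns (F(n), F(n+1))
--     if n == 0:
--         return (0, 1)
--     a, b = _fib_pair(n // 2)
--     c = a * (2 * b - a)
--     d = a * a + b * b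
--     if n % 2 == 0:
--         return (c, d)
--     return (d, c + d)
--
-- def perimetre(nb):
--     if nb <= 0:
--         return 4
--     return 4 * _fib_pair(nb + 3)[0] - 4
-- ===== Notes on version B (the rewrite author's own statement) =====
-- stated objective: faster
-- what changed: Replaced the linear three-register Fibonacci loop by fast-doubling Fibonacci combined with the Fibonacci prefix-sum closed form for the perimeter.
import Mathlib
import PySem

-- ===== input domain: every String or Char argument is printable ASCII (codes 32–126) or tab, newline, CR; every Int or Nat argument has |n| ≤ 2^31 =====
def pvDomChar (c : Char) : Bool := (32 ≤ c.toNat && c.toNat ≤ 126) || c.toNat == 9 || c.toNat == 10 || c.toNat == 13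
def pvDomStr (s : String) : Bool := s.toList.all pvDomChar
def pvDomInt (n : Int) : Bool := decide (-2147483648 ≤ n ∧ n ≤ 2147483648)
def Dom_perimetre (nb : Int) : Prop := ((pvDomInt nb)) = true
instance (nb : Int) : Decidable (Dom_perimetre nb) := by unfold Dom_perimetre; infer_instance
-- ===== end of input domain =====

-- B replaces A's linear Fibonacci loop by fast-doubling Fibonacci with the prefix-sum closed form (asymptotically faster).

-- ===== PORT A =====
-- one iteration of A's loop body on the state (square_1, square_2, square_3, perimeter)
def pvStepA (st : Int × Int × Int × Int) : Int × Int × Int × Int :=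
  (st.2.1, st.2.2.1, st.2.2.1 + st.2.1, st.2.2.2 + 4 * st.2.2.1)

def perimetre (nb : Int) : Int :=
  ((PySem.List.pyRange 0 nb 1).foldl (fun st _ => pvStepA st) (0, 1, 1, 4)).2.2.2

-- ===== PORT B =====
-- fast doubling: pvFibPair n = (F(n), F(n+1))
def pvFibPair (n : Nat) : Int × Int :=
  if h : n = 0 then (0, 1)
  else
    let p := pvFibPair (n / 2)
    let c := p.1 * (2 * p.2 - p.1)
    let d := p.1 * p.1 + p.2 * p.2
    if n % 2 == 0 then (c, d) else (d, c + d)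
decreasing_by exact Nat.div_lt_self (Nat.pos_of_ne_zero h) one_lt_two

def perimetre_alt (nb : Int) : Int :=
  if nb ≤ 0 then 4 else 4 * (pvFibPair (nb + 3).toNat).1 - 4

-- ===== PRECONDITION & SPEC =====
def Spec_perimetre (nb : Int) (out : Int) : Prop := out = perimetre_alt nb
instance (nb : Int) (out : Int) : Decidable (Spec_perimetre nb out) := by unfold Spec_perimetre; infer_instance

-- ===== CLAIM (what is proved, stated in full; the proofs are below) =====
def Claim_equal_perimetre : Prop := ∀ (nb : Int), Dom_perimetre nb → Spec_perimetre nb (perimetre nb)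

-- ===== LEMMAS AND PROOFS =====

-- fast doubling computes (F(n), F(n+1))
theorem pvFibPair_eq (n : Nat) : pvFibPair n = ((Nat.fib n : Int), (Nat.fib (n + 1) : Int)) := by
  induction n using Nat.strong_induction_on with
  | _ n ih =>
    rw [pvFibPair]
    by_cases h : n = 0
    · simp [h]
    · simp only [h, dif_neg, not_false_iff]
      have hrec := ih (n / 2) (Nat.div_lt_self (Nat.pos_of_ne_zero h) one_lt_two)
      set m := n / 2 with hm
      have hle : Nat.fib m ≤ 2 * Nat.fib (m + 1) :=
        le_trans (Nat.fib_le_fib_succ) (by omega)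
      have hc : (Nat.fib m : Int) * (2 * Nat.fib (m + 1) - Nat.fib m) = (Nat.fib (2 * m) : Int) := by
        rw [Nat.fib_two_mul]; push_cast [hle]; ring
      have hd : (Nat.fib m : Int) * Nat.fib m + (Nat.fib (m + 1) : Int) * Nat.fib (m + 1)
          = (Nat.fib (2 * m + 1) : Int) := by
        rw [Nat.fib_two_mul_add_one]; push_cast; ring
      rcases Nat.even_or_odd n with he | ho
      · have h2 : n % 2 = 0 := Nat.even_iff.mp he
        have hn : n = 2 * m := by omega
        simp only [hrec, h2]
        rw [if_pos (by decide)]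
        refine Prod.ext ?_ ?_ <;> simp only [hn]
        · exact hc
        · exact hd
      · have h2 : n % 2 = 1 := Nat.odd_iff.mp ho
        have hn : n = 2 * m + 1 := by omega
        simp only [hrec, h2]
        rw [if_neg (by decide)]
        refine Prod.ext ?_ ?_ <;> simp only [hn]
        · exact hd
        · have hadd : (Nat.fib (2 * m + 1 + 1) : Int)
              = (Nat.fib (2 * m) : Int) + (Nat.fib (2 * m + 1) : Int) := by
            rw [show 2 * m + 1 + 1 = 2 * m + 2 from rfl, Nat.fib_add_two]
            push_cast; ring
          rw [hadd, ← hc, ← hd]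

-- a foldl that ignores the list elements is an iterate of the step
theorem foldl_const_step (l : List Int) (s : Int × Int × Int × Int) :
    l.foldl (fun st _ => pvStepA st) s = pvStepA^[l.length] s := by
  induction l generalizing s with
  | nil => rfl
  | cons x xs ih => simp [List.foldl_cons, ih, Function.iterate_succ_apply]

-- loop invariant: after k iterations the state is (F(k), F(k+1), F(k+2), 4*F(k+3) - 4)
theorem stepA_invariant (k : Nat) :
    pvStepA^[k] (0, 1, 1, 4)
      = ((Nat.fib k : Int), (Nat.fib (k + 1) : Int), (Nat.fib (k + 2) : Int),
         4 * (Nat.fib (k + 3) : Int) - 4) := by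
  induction k with
  | zero => simp [Nat.fib]
  | succ k ih =>
    rw [Function.iterate_succ_apply', ih]
    simp only [pvStepA]
    refine Prod.ext rfl (Prod.ext rfl (Prod.ext ?_ ?_)) <;> simp only
    · have : Nat.fib (k + 3) = Nat.fib (k + 1) + Nat.fib (k + 2) := by
        rw [Nat.fib_add_two]
      rw [show k + 1 + 2 = k + 3 from rfl, this]; push_cast; ring
    · have : Nat.fib (k + 4) = Nat.fib (k + 2) + Nat.fib (k + 3) := by
        rw [show k + 4 = (k + 2) + 2 from rfl, Nat.fib_add_two]
      rw [show k + 1 + 3 = k + 4 from rfl, this]; push_cast; ring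

-- ===== VERDICT (by name: the statement is the Claim_ definition above) =====
theorem perimetre_spec : Claim_equal_perimetre := by
  intro nb _
  unfold Spec_perimetre perimetre perimetre_alt
  by_cases h : nb ≤ 0
  · rw [PySem.List.pyRange_one_eq_nil (by omega)]
    simp [h]
  · rw [if_neg h]
    rw [foldl_const_step, PySem.List.length_pyRange_one, stepA_invariant]
    have h1 : (nb - 0).toNat + 3 = (nb + 3).toNat := by omega
    rw [h1, pvFibPair_eq]
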